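-- pv_equiv track=rewrite | github.com/yabincui/topcoder | RelationClassifier.py | isBijection
-- ===== SOURCE A (Python) =====
-- def isBijection(domain, range):
-- 	d = {}
-- 	for x in domain:
-- 		if x in d:
-- 			return 'Not'
-- 		d[x] = True
-- 	d = {}
-- 	for x in range:
-- 		if x in d:
-- 			return 'Not'
-- 		d[x] = True
-- 	return 'Bijection'
-- ===== SOURCE B (Python) =====
-- def _adjacent_dup(xs):
--     s = sorted(xs)
--     for a, b in zip(s, s[1:]):
--         if a == b:
--             return True
--     return False
--
-- def isBijection(domain, range):
--     if _adjacent_dup(domain):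
--         return 'Not'
--     if _adjacent_dup(range):
--         return 'Not'
--     return 'Bijection'
-- ===== Notes on version B (the rewrite author's own statement) =====
-- stated objective: alternative
-- what changed: Replaces A's hash-dict membership loops by sorting each sequence and scanning adjacent pairs for an equal neighbour (duplicates in a sorted list are adjacent).
import Mathlib
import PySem

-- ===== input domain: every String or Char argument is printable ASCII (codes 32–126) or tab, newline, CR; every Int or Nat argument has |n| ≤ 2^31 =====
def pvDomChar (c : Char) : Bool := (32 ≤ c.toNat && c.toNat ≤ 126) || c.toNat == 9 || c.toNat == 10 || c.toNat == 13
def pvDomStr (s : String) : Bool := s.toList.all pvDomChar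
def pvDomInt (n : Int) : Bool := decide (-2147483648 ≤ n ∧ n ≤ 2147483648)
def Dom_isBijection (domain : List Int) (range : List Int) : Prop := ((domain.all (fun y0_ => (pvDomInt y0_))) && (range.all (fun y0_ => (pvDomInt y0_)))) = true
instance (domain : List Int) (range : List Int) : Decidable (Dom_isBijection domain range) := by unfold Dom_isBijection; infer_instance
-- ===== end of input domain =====

-- B replaces A's hash-dict membership loops with sort-then-adjacent-scan duplicate detection (alternative algorithm).


-- ===== PORT A =====
-- 'for x in xs: if x in d: return "Not"; d[x] = True' — returns true iff the loop hit 'return'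
def isBijectionLoop (xs : List Int) (d : PySem.Dict Int Bool) : Bool :=
  match xs with
  | [] => false
  | x :: rest => if d.contains x then true else isBijectionLoop rest (d.insert x true)

def isBijection (domain : List Int) (range : List Int) : String :=
  if isBijectionLoop domain PySem.Dict.empty then "Not"
  else if isBijectionLoop range PySem.Dict.empty then "Not"
  else "Bijection"

-- ===== PORT B =====
-- 'for a, b in zip(s, s[1:]): if a == b: return True' — adjacent-pair scan
def adjacentDup (s : List Int) : Bool :=
  match s with
  | a :: b :: rest => if a == b then true else adjacentDup (b :: rest)
  | _ => false

def isBijection_alt (domain : List Int) (range : List Int) : String :=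
  if adjacentDup (PySem.List.sorted domain (fun x => x) false) then "Not"
  else if adjacentDup (PySem.List.sorted range (fun x => x) false) then "Not"
  else "Bijection"

-- ===== PRECONDITION & SPEC =====
def Spec_isBijection (domain : List Int) (range : List Int) (out : String) : Prop := out = isBijection_alt domain range
instance (domain : List Int) (range : List Int) (out : String) : Decidable (Spec_isBijection domain range out) := by unfold Spec_isBijection; infer_instance

-- ===== CLAIM (what is proved, stated in full; the proofs are below) =====
def Claim_equal_isBijection : Prop := ∀ (domain : List Int) (range : List Int), Dom_isBijection domain range → Spec_isBijection domain range (isBijection domain range)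

-- ===== LEMMAS AND PROOFS =====

-- A's loop returns false iff the list is duplicate-free and touches no key already in d.
lemma isBijectionLoop_eq_false_iff (xs : List Int) (d : PySem.Dict Int Bool) :
    isBijectionLoop xs d = false ↔ xs.Nodup ∧ ∀ x ∈ xs, d.contains x = false := by
  induction xs generalizing d with
  | nil => simp [isBijectionLoop]
  | cons x rest ih =>
    by_cases h : d.contains x = true
    · rw [isBijectionLoop, if_pos h]
      constructor
      · intro hf; simp at hf
      · rintro ⟨_, hall⟩; exact absurd (hall x List.mem_cons_self) (by simp [h])
    · have h' : d.contains x = false := by simpa using h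
      rw [isBijectionLoop, if_neg h, ih]
      constructor
      · rintro ⟨hnd, hall⟩
        refine ⟨List.nodup_cons.mpr ⟨fun hm => ?_, hnd⟩, ?_⟩
        · have := hall x hm
          simp at this
        · intro y hy
          rcases List.mem_cons.mp hy with rfl | hy'
          · exact h'
          · have := hall y hy'
            simp [PySem.Dict.contains_insert] at this
            exact this.2
      · rintro ⟨hnd, hall⟩
        rcases List.nodup_cons.mp hnd with ⟨hx, hnd'⟩
        refine ⟨hnd', fun y hy => ?_⟩
        simp [PySem.Dict.contains_insert]
        exact ⟨fun hyx => hx (hyx ▸ hy), hall y (List.mem_cons_of_mem _ hy)⟩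

-- on a (≤)-sorted list, the adjacent scan finds no equal pair iff the list is duplicate-free
lemma adjacentDup_eq_false_iff_nodup (s : List Int) (hs : s.Pairwise (· ≤ ·)) :
    adjacentDup s = false ↔ s.Nodup := by
  induction s with
  | nil => simp [adjacentDup]
  | cons a t ih =>
    cases t with
    | nil => simp [adjacentDup]
    | cons b rest =>
      rcases List.pairwise_cons.mp hs with ⟨hale, htail⟩
      by_cases hab : a = b
      · subst hab
        rw [adjacentDup, if_pos (by simp)]
        simp
      · rw [adjacentDup, if_neg (by simpa using hab), ih htail]
        have halt : ∀ y ∈ b :: rest, a < y := by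
          intro y hy
          rcases List.mem_cons.mp hy with rfl | hy'
          · exact lt_of_le_of_ne (hale y List.mem_cons_self) hab
          · have hab' : a < b := lt_of_le_of_ne (hale b List.mem_cons_self) hab
            have hby : b ≤ y := (List.pairwise_cons.mp htail).1 y hy'
            exact lt_of_lt_of_le hab' hby
        constructor
        · intro h
          exact List.nodup_cons.mpr ⟨fun hm => absurd rfl (ne_of_lt (halt a hm)), h⟩
        · intro h
          exact (List.nodup_cons.mp h).2

-- sorting, then scanning for an adjacent equal pair, detects exactly non-Nodup
lemma adjacentDup_sorted_eq_false_iff (xs : List Int) :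
    adjacentDup (PySem.List.sorted xs (fun x => x) false) = false ↔ xs.Nodup := by
  rw [adjacentDup_eq_false_iff_nodup _ (by simpa using PySem.List.sorted_pairwise xs (fun x => x))]
  exact (PySem.List.sorted_perm xs (fun x => x) false).nodup_iff

-- ===== VERDICT (by name: the statement is the Claim_ definition above) =====
theorem isBijection_spec : Claim_equal_isBijection := by
  intro domain range _
  unfold Spec_isBijection isBijection isBijection_alt
  have hd := isBijectionLoop_eq_false_iff domain PySem.Dict.empty
  have hr := isBijectionLoop_eq_false_iff range PySem.Dict.empty
  simp only [PySem.Dict.contains_empty, implies_true, and_true] at hd hr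
  have hd' := adjacentDup_sorted_eq_false_iff domain
  have hr' := adjacentDup_sorted_eq_false_iff range
  have tt : ∀ (b : Bool) (P : Prop), (b = false ↔ P) → ¬P → b = true := by
    intro b P hiff hnp
    rcases Bool.eq_false_or_eq_true b with h | h
    · exact h
    · exact absurd (hiff.mp h) hnp
  by_cases h1 : domain.Nodup <;> by_cases h2 : range.Nodup
  · simp only [hd.mpr h1, hr.mpr h2, hd'.mpr h1, hr'.mpr h2]
  · simp [hd.mpr h1, tt _ _ hr h2, hd'.mpr h1, tt _ _ hr' h2]
  · simp [tt _ _ hd h1, tt _ _ hd' h1]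
  · simp [tt _ _ hd h1, tt _ _ hd' h1]
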